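-- pv_equiv track=rewrite | github.com/juanr4dev/codember | challenger04/solution.py | searchPwd
-- ===== SOURCE A (Python) =====
-- def searchPwd(fromNum, toNum):
--     possiblePwd = []
--     for pwd in range(fromNum,toNum):
--         increment = True
--         prevDigit = '0'
--         for digit in str(pwd):
--             if digit < prevDigit:
--                 increment = False
--                 break
--             prevDigit = digit
--         if ( increment and str(pwd).count('5') >= 2 ):
--             possiblePwd.append(pwd)
--     return possiblePwd
-- ===== SOURCE B (Python) =====
-- def searchPwd(fromNum, toNum):
--     # DFS over non-decreasing digit prefixes (pruned to the range) instead of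
--     # scanning every number in range(fromNum, toNum).
--     possiblePwd = []
--
--     def dfs(prefix, last, k, fives):
--         lo = prefix * 10 ** k
--         hi = (prefix + 1) * 10 ** k
--         if toNum <= lo or hi <= fromNum:
--             return
--         if k == 0:
--             if fives >= 2:
--                 possiblePwd.append(prefix)
--             return
--         for d in range(last, 10):
--             dfs(prefix * 10 + d, d, k - 1, fives + (1 if d == 5 else 0))
--
--     for length in range(1, 11):
--         for d in range(1, 10):
--             dfs(d, d, length - 1, 1 if d == 5 else 0)
--     return possiblePwd
-- ===== Notes on version B (the rewrite author's own statement) =====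
-- stated objective: faster
-- what changed: Instead of testing every integer in range(fromNum, toNum) digit-by-digit, B enumerates only the numbers with non-decreasing digits by a DFS over digit prefixes (per digit-length, children d >= last digit), prunes subtrees whose value interval misses [fromNum, toNum), and tracks the count of fives along the path.
import Mathlib
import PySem

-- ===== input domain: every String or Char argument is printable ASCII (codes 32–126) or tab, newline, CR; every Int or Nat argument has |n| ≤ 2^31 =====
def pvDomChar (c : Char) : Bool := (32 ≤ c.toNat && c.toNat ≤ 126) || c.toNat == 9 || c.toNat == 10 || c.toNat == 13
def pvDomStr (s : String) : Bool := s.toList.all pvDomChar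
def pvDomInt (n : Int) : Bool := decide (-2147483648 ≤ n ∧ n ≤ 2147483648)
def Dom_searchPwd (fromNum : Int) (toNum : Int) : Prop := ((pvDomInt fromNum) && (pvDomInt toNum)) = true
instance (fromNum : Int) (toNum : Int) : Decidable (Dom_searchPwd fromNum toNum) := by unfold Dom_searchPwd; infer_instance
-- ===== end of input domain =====

-- B replaces A's per-integer scan of range(fromNum, toNum) by a pruned DFS over
-- non-decreasing digit prefixes (objective: faster on large ranges).


-- ===== PORT A =====
-- the inner `for digit in str(pwd)` loop of A; `break` is the early `false` return
def searchPwdScan : Char → List Char → Bool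
  | _, [] => true
  | prevDigit, digit :: rest => if digit < prevDigit then false else searchPwdScan digit rest

def searchPwd (fromNum : Int) (toNum : Int) : List Int :=
  (PySem.List.pyRange fromNum toNum 1).foldl
    (fun possiblePwd pwd =>
      if searchPwdScan '0' (PySem.Int.toStr pwd).toList
          && decide (2 ≤ PySem.Str.count (PySem.Int.toStr pwd) "5")
      then possiblePwd ++ [pwd] else possiblePwd)
    []

-- ===== PORT B =====
-- dfs(prefix, last, k, fives) of Source B; the Python appends into a shared list,
-- the port returns the elements it appends, in the same order
def searchPwdDfs (fromNum : Int) (toNum : Int) (pfx : Int) (last : Int) (k : Nat) (fives : Int) : List Int :=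
  let lo := pfx * 10 ^ k
  let hi := (pfx + 1) * 10 ^ k
  if toNum ≤ lo ∨ hi ≤ fromNum then []
  else
    match k with
    | 0 => if 2 ≤ fives then [pfx] else []
    | k' + 1 =>
      (PySem.List.pyRange last 10 1).foldl
        (fun acc d =>
          acc ++ searchPwdDfs fromNum toNum (pfx * 10 + d) d k' (fives + if d == 5 then 1 else 0))
        []

def searchPwd_alt (fromNum : Int) (toNum : Int) : List Int :=
  (PySem.List.pyRange 1 11 1).foldl
    (fun acc length =>
      (PySem.List.pyRange 1 10 1).foldl
        (fun acc d =>
          acc ++ searchPwdDfs fromNum toNum d d (length - 1).toNat (if d == 5 then 1 else 0))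
        acc)
    []

-- ===== PRECONDITION & SPEC =====
def Spec_searchPwd (fromNum : Int) (toNum : Int) (out : List Int) : Prop := out = searchPwd_alt fromNum toNum
instance (fromNum : Int) (toNum : Int) (out : List Int) : Decidable (Spec_searchPwd fromNum toNum out) := by unfold Spec_searchPwd; infer_instance

-- ===== CLAIM (what is proved, stated in full; the proofs are below) =====
def Claim_equal_searchPwd : Prop := ∀ (fromNum : Int) (toNum : Int), Dom_searchPwd fromNum toNum → Spec_searchPwd fromNum toNum (searchPwd fromNum toNum)

-- ===== LEMMAS AND PROOFS =====

-- numeric mirrors of "digits non-decreasing", "count of digit 5", "decimal digit chars"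
def pvNd (n : Nat) : Bool :=
  if n < 10 then true
  else pvNd (n / 10) && decide ((n / 10) % 10 ≤ n % 10)
decreasing_by exact Nat.div_lt_self (by omega) (by omega)

def pvC5 (n : Nat) : Nat :=
  if n < 10 then (if n = 5 then 1 else 0)
  else pvC5 (n / 10) + (if n % 10 = 5 then 1 else 0)
decreasing_by exact Nat.div_lt_self (by omega) (by omega)

def pvG (n : Nat) : List Char :=
  if n < 10 then [Nat.digitChar n]
  else pvG (n / 10) ++ [Nat.digitChar (n % 10)]
decreasing_by exact Nat.div_lt_self (by omega) (by omega)

-- the filter predicate B's DFS realises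
def pvQ (fromNum : Int) (toNum : Int) (n : Int) : Bool :=
  decide (fromNum ≤ n) && decide (n < toNum) && pvNd n.toNat && decide (2 ≤ pvC5 n.toNat)

-- Chars.count with a single-char needle is List.count
theorem pvCountGo (c : Char) : ∀ (fuel : Nat) (l : List Char) (acc : Nat), l.length ≤ fuel →
    PySem.Chars.count.go [c] fuel l acc = acc + l.count c := by
  intro fuel
  induction fuel with
  | zero =>
    intro l acc h
    cases l with
    | nil => simp [PySem.Chars.count.go]
    | cons x t => simp at h
  | succ f ih =>
    intro l acc h
    cases l with
    | nil => simp [PySem.Chars.count.go]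
    | cons x t =>
      simp only [PySem.Chars.count.go]
      have hpre : List.isPrefixOf [c] (x :: t) = (c == x) := by simp [List.isPrefixOf]
      rw [hpre]
      by_cases hc : c = x
      · subst hc
        simp only [BEq.rfl, if_pos]
        have hdrop : List.drop [c].length (c :: t) = t := by simp
        rw [hdrop, ih t (acc + 1) (by simpa using h)]
        simp [List.count_cons]
        omega
      · have hb : (c == x) = false := by simpa using hc
        rw [hb]
        simp only [Bool.false_eq_true, if_false]
        rw [ih t acc (by simpa using h)]
        have : (x == c) = false := by simpa using (Ne.symm hc)
        simp [List.count_cons, this]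

theorem pvCountSingleton (l : List Char) (c : Char) :
    PySem.Chars.count l [c] = l.count c := by
  simp [PySem.Chars.count]
  simpa using pvCountGo c l.length l 0 le_rfl

-- str(n) for 0 ≤ n is pvG of its magnitude
theorem pvToDigitsCore : ∀ (f n : Nat) (ds : List Char), n < 10 ^ (f + 1) →
    Nat.toDigitsCore 10 (f + 1) n ds = pvG n ++ ds := by
  intro f
  induction f with
  | zero =>
    intro n ds h
    simp at h
    interval_cases n <;> simp [Nat.toDigitsCore, pvG] <;> rfl
  | succ f ih =>
    intro n ds h
    rw [Nat.toDigitsCore]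
    by_cases h0 : n / 10 = 0
    · have hn : n < 10 := by omega
      rw [pvG]
      simp [hn, h0, Nat.mod_eq_of_lt hn]
    · rw [if_neg h0]
      rw [ih (n / 10) _ (by omega)]
      have hge : ¬ n < 10 := by omega
      rw [show pvG n = pvG (n / 10) ++ [Nat.digitChar (n % 10)] from by rw [pvG]; simp [hge]]
      simp

theorem pvToChars (n : Int) (h : 0 ≤ n) : PySem.Int.toChars n = pvG n.toNat := by
  rw [PySem.Int.toChars, if_neg (by omega)]
  rw [Nat.toDigits]
  have hlt : n.toNat < 10 ^ (n.toNat + 1) :=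
    lt_of_lt_of_le (Nat.lt_pow_self (by norm_num)) (Nat.pow_le_pow_right (by norm_num) (Nat.le_succ _))
  simpa using pvToDigitsCore n.toNat n.toNat [] hlt

-- digitChar facts for digits 0..9
theorem pvDigitGe (d : Nat) (h : d < 10) : ¬ (Nat.digitChar d < '0') := by
  interval_cases d <;> decide

theorem pvDigitLt (d e : Nat) (hd : d < 10) (he : e < 10) :
    (Nat.digitChar d < Nat.digitChar e) ↔ d < e := by
  interval_cases d <;> interval_cases e <;> decide

theorem pvDigitFive (d : Nat) (h : d < 10) : (Nat.digitChar d = '5') ↔ d = 5 := by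
  interval_cases d <;> decide

theorem pvG_getLast? (n : Nat) : (pvG n).getLast? = some (Nat.digitChar (n % 10)) := by
  induction n using pvG.induct with
  | case1 n h => rw [pvG]; simp [h, Nat.mod_eq_of_lt h]
  | case2 n h ih => rw [pvG]; simp [h]

-- A's digit scan characterised
theorem pvScanSnoc (xs : List Char) : ∀ (p c : Char),
    searchPwdScan p (xs ++ [c])
      = (searchPwdScan p xs && !(decide (c < (p :: xs).getLast (List.cons_ne_nil p xs)))) := by
  induction xs with
  | nil =>
    intro p c
    by_cases hc : c < p <;> simp [searchPwdScan, hc]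
  | cons x xs ih =>
    intro p c
    have hlast : (p :: x :: xs).getLast (List.cons_ne_nil p (x :: xs))
        = (x :: xs).getLast (List.cons_ne_nil x xs) := List.getLast_cons _
    by_cases hx : x < p
    · simp [searchPwdScan, hx]
    · have l1 : searchPwdScan p (x :: (xs ++ [c])) = searchPwdScan x (xs ++ [c]) := by
        simp [searchPwdScan, hx]
      have l2 : searchPwdScan p (x :: xs) = searchPwdScan x xs := by simp [searchPwdScan, hx]
      rw [List.cons_append, l1, l2, hlast, ih x c]

theorem pvScanG (n : Nat) : searchPwdScan '0' (pvG n) = pvNd n := by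
  induction n using pvG.induct with
  | case1 n h =>
    rw [pvG, pvNd]
    simp [h, searchPwdScan, pvDigitGe n h]
  | case2 n h ih =>
    rw [show pvG n = pvG (n / 10) ++ [Nat.digitChar (n % 10)] from by rw [pvG]; simp [h]]
    rw [pvScanSnoc]
    have hne : pvG (n / 10) ≠ [] := by
      intro hnil
      have := pvG_getLast? (n / 10)
      rw [hnil] at this
      simp at this
    have hlast : ('0' :: pvG (n / 10)).getLast (List.cons_ne_nil _ _)
        = Nat.digitChar ((n / 10) % 10) := by
      rw [List.getLast_cons hne]
      have := List.getLast?_eq_getLast (l := pvG (n / 10)) hne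
      rw [pvG_getLast? (n / 10)] at this
      exact (Option.some_injective _ this).symm
    rw [hlast, ih]
    rw [show pvNd n = (pvNd (n / 10) && decide ((n / 10) % 10 ≤ n % 10)) from by
      rw [pvNd]; simp [h]]
    congr 1
    have h1 : n % 10 < 10 := Nat.mod_lt _ (by omega)
    have h2 : (n / 10) % 10 < 10 := Nat.mod_lt _ (by omega)
    have hdec : decide (Nat.digitChar (n % 10) < Nat.digitChar ((n / 10) % 10))
        = decide ((n % 10) < ((n / 10) % 10)) := decide_eq_decide.mpr (pvDigitLt _ _ h1 h2)
    rw [hdec]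
    by_cases hle : (n / 10) % 10 ≤ n % 10 <;> simp [hle] <;> omega

theorem pvCountG (n : Nat) : (pvG n).count '5' = pvC5 n := by
  induction n using pvG.induct with
  | case1 n h =>
    rw [pvG, pvC5]
    simp only [h, if_pos]
    by_cases h5 : n = 5
    · subst h5; decide
    · have : ¬ (Nat.digitChar n = '5') := fun hh => h5 ((pvDigitFive n h).mp hh)
      simp [List.count_cons, this, h5]
  | case2 n h ih =>
    rw [show pvG n = pvG (n / 10) ++ [Nat.digitChar (n % 10)] from by rw [pvG]; simp [h]]
    rw [show pvC5 n = pvC5 (n / 10) + (if n % 10 = 5 then 1 else 0) from by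
      rw [pvC5]; simp [h]]
    rw [List.count_append, ih]
    congr 1
    have h1 : n % 10 < 10 := Nat.mod_lt _ (by omega)
    by_cases h5 : n % 10 = 5
    · rw [h5]; decide
    · have : ¬ (Nat.digitChar (n % 10) = '5') := fun hh => h5 ((pvDigitFive _ h1).mp hh)
      simp [List.count_cons, this, h5]

-- A's per-element test, numerically
theorem pvP_iff (x : Int) :
    (searchPwdScan '0' (PySem.Int.toStr x).toList
      && decide (2 ≤ PySem.Str.count (PySem.Int.toStr x) "5")) = true
    ↔ (1 ≤ x ∧ pvNd x.toNat = true ∧ 2 ≤ pvC5 x.toNat) := by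
  have hc : PySem.Str.count (PySem.Int.toStr x) "5" = (PySem.Int.toChars x).count '5' := by
    rw [PySem.Str.count_eq, PySem.Int.toList_toStr]
    rw [show ("5" : String).toList = ['5'] from rfl]
    exact pvCountSingleton _ _
  have ht : (PySem.Int.toStr x).toList = PySem.Int.toChars x := PySem.Int.toList_toStr x
  rw [ht, hc]
  rcases lt_trichotomy x 0 with hneg | hzero | hpos
  · have : PySem.Int.toChars x = '-' :: Nat.toDigits 10 x.natAbs := by
      rw [PySem.Int.toChars, if_pos hneg]
    rw [this]
    have : searchPwdScan '0' ('-' :: Nat.toDigits 10 x.natAbs) = false := by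
      simp [searchPwdScan, show ('-' : Char) < '0' from by decide]
    rw [this]
    simp
    omega
  · subst hzero
    rw [pvToChars 0 le_rfl, pvScanG, pvCountG]
    have h0 : pvC5 ((0 : Int).toNat) = 0 := by
      rw [show ((0 : Int).toNat) = 0 from rfl, pvC5]; norm_num
    rw [h0]
    simp
  · rw [pvToChars x (by omega), pvScanG, pvCountG]
    simp only [Bool.and_eq_true, decide_eq_true_eq]
    constructor
    · rintro ⟨h1, h2⟩; exact ⟨by omega, h1, h2⟩
    · rintro ⟨_, h1, h2⟩; exact ⟨h1, h2⟩

-- a fold appending per-interval filters is the filter of the whole interval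
theorem pvGMono (g : Int → Int) : ∀ (len : Nat) (a : Int),
    (∀ d, a ≤ d → d < a + len → g d ≤ g (d + 1)) → g a ≤ g (a + len) := by
  intro len
  induction len with
  | zero => intro a _; simp
  | succ m ih =>
    intro a h
    have h1 : g a ≤ g (a + 1) := h a le_rfl (by push_cast; omega)
    have h2 : g (a + 1) ≤ g (a + 1 + m) := ih (a + 1) (fun d hd1 hd2 => h d (by omega) (by push_cast at *; omega))
    have : a + 1 + (m : Int) = a + ((m : Nat) + 1 : Nat) := by push_cast; ring
    rw [this] at h2
    exact le_trans h1 h2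

theorem pvFoldFilter (q : Int → Bool) (g : Int → Int) (F : Int → List Int) :
    ∀ (len : Nat) (a : Int) (init : List Int),
    (∀ d, a ≤ d → d < a + len → F d = (PySem.List.pyRange (g d) (g (d + 1)) 1).filter q) →
    (∀ d, a ≤ d → d < a + len → g d ≤ g (d + 1)) →
    (PySem.List.pyRange a (a + len) 1).foldl (fun acc d => acc ++ F d) init
      = init ++ (PySem.List.pyRange (g a) (g (a + len)) 1).filter q := by
  intro len
  induction len with
  | zero =>
    intro a init _ _
    simp [PySem.List.pyRange_one_eq_nil (le_refl a)]
  | succ m ih =>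
    intro a init hF hg
    have hcons : PySem.List.pyRange a (a + ((m : Nat) + 1 : Nat)) 1
        = a :: PySem.List.pyRange (a + 1) (a + ((m : Nat) + 1 : Nat)) 1 :=
      PySem.List.pyRange_one_cons (by push_cast; omega)
    have hshift : a + ((m : Nat) + 1 : Nat) = (a + 1) + (m : Nat) := by push_cast; ring
    rw [hcons, List.foldl_cons]
    rw [hshift]
    rw [ih (a + 1) (init ++ F a)
      (fun d hd1 hd2 => hF d (by omega) (by push_cast at *; omega))
      (fun d hd1 hd2 => hg d (by omega) (by push_cast at *; omega))]
    rw [hF a le_rfl (by push_cast; omega)]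
    have hm1 : g a ≤ g (a + 1) := hg a le_rfl (by push_cast; omega)
    have hm2 : g (a + 1) ≤ g (a + 1 + m) :=
      pvGMono g m (a + 1) (fun d hd1 hd2 => hg d (by omega) (by push_cast at *; omega))
    rw [List.append_assoc, ← List.filter_append]
    rw [← PySem.List.pyRange_one_append (g a) (g (a + 1)) (g (a + 1 + m)) hm1 hm2]

-- arithmetic digit lemmas
theorem pvNdTen (m : Nat) (h : 10 ≤ m) :
    pvNd m = (pvNd (m / 10) && decide ((m / 10) % 10 ≤ m % 10)) := by
  rw [pvNd]; simp [show ¬ m < 10 from by omega]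

theorem pvNdDivPow : ∀ (k n : Nat), 10 ^ k ≤ n → pvNd n = true → pvNd (n / 10 ^ k) = true := by
  intro k
  induction k with
  | zero => intro n _ h; simpa using h
  | succ m ih =>
    intro n hle hnd
    have h10 : 10 ≤ n := by
      refine le_trans ?_ hle
      calc (10 : Nat) = 10 ^ 1 := by norm_num
        _ ≤ 10 ^ (m + 1) := Nat.pow_le_pow_right (by norm_num) (by omega)
    have h1 : pvNd (n / 10) = true := by
      rw [pvNdTen n h10] at hnd
      simp only [Bool.and_eq_true] at hnd
      exact hnd.1
    have h2 : 10 ^ m ≤ n / 10 := by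
      rw [Nat.le_div_iff_mul_le (by norm_num)]
      calc 10 ^ m * 10 = 10 ^ (m + 1) := (pow_succ 10 m).symm
        _ ≤ n := hle
    have := ih (n / 10) h2 h1
    rwa [Nat.div_div_eq_div_mul, show (10 : Nat) * 10 ^ m = 10 ^ (m + 1) from by ring] at this

theorem pvNdChild (p d : Nat) (hp : 1 ≤ p) (hd : d < 10) :
    pvNd (10 * p + d) = (pvNd p && decide (p % 10 ≤ d)) := by
  rw [pvNdTen (10 * p + d) (by omega)]
  rw [show (10 * p + d) / 10 = p from by omega, show (10 * p + d) % 10 = d from by omega]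

theorem pvC5Child (p d : Nat) (hp : 1 ≤ p) (hd : d < 10) :
    pvC5 (10 * p + d) = pvC5 p + (if d = 5 then 1 else 0) := by
  rw [show pvC5 (10 * p + d) = pvC5 ((10 * p + d) / 10) + (if (10 * p + d) % 10 = 5 then 1 else 0) from by
    rw [pvC5]; simp [show ¬ (10 * p + d) < 10 from by omega]]
  rw [show (10 * p + d) / 10 = p from by omega, show (10 * p + d) % 10 = d from by omega]

-- the DFS invariant: dfs realises the filter on its value interval
theorem pvDfs (fromNum toNum : Int) : ∀ (k : Nat) (p last fives : Int),
    1 ≤ p → pvNd p.toNat = true → last = ((p.toNat % 10 : Nat) : Int) → fives = ((pvC5 p.toNat : Nat) : Int) →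
    searchPwdDfs fromNum toNum p last k fives
      = (PySem.List.pyRange (p * 10 ^ k) ((p + 1) * 10 ^ k) 1).filter (pvQ fromNum toNum) := by
  intro k
  induction k with
  | zero =>
    intro p last fives hp hnd hlast hfives
    rw [searchPwdDfs]
    simp only [pow_zero, mul_one]
    by_cases hpr : toNum ≤ p ∨ p + 1 ≤ fromNum
    · rw [if_pos hpr]
      symm
      rw [List.filter_eq_nil_iff]
      intro n hn
      rw [PySem.List.mem_pyRange_one] at hn
      have hnp : n = p := by omega
      subst hnp
      rcases hpr with h | h <;> simp [pvQ] <;> omega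
    · rw [if_neg hpr]
      push_neg at hpr
      rw [PySem.List.pyRange_one_singleton]
      have hq : pvQ fromNum toNum p = decide (2 ≤ pvC5 p.toNat) := by
        simp [pvQ, hnd, show fromNum ≤ p from by omega, show p < toNum from by omega]
      by_cases h5 : 2 ≤ pvC5 p.toNat
      · rw [if_pos (show 2 ≤ fives from by rw [hfives]; exact_mod_cast h5)]
        simp [List.filter, hq, h5]
      · rw [if_neg (show ¬ 2 ≤ fives from by rw [hfives]; exact_mod_cast h5)]
        simp [List.filter, hq, h5]
  | succ k ih =>
    intro p last fives hp hnd hlast hfives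
    rw [searchPwdDfs]
    by_cases hpr : toNum ≤ p * 10 ^ (k + 1) ∨ (p + 1) * 10 ^ (k + 1) ≤ fromNum
    · rw [if_pos hpr]
      symm
      rw [List.filter_eq_nil_iff]
      intro n hn
      rw [PySem.List.mem_pyRange_one] at hn
      rcases hpr with h | h <;> simp [pvQ] <;> omega
    · rw [if_neg hpr]
      -- the d-loop
      subst hlast hfives
      set P := p.toNat with hPdef
      set L : Nat := P % 10 with hLdef
      have hp0 : p = (P : Int) := by omega
      have hL9 : L ≤ 9 := by omega
      have hP1 : 1 ≤ P := by omega
      set g : Int → Int := fun d => (p * 10 + d) * 10 ^ k with hgdef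
      set F : Int → List Int := fun d =>
        searchPwdDfs fromNum toNum (p * 10 + d) d k ((pvC5 P : Int) + if d == 5 then 1 else 0) with hFdef
      have hpow : (0 : Int) < 10 ^ k := by positivity
      have hrange : PySem.List.pyRange ((L : Nat) : Int) 10 1
          = PySem.List.pyRange ((L : Nat) : Int) (((L : Nat) : Int) + ((10 - L : Nat) : Int)) 1 := by
        congr 1
        omega
      have hF : ∀ d, ((L : Nat) : Int) ≤ d → d < ((L : Nat) : Int) + ((10 - L : Nat) : Int) →
          F d = (PySem.List.pyRange (g d) (g (d + 1)) 1).filter (pvQ fromNum toNum) := by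
        intro d hd1 hd2
        have hd0 : 0 ≤ d := by omega
        have hdlt : d < 10 := by omega
        have hdN : (d.toNat : Int) = d := by omega
        have hchild : (p * 10 + d).toNat = 10 * P + d.toNat := by omega
        have hnd' : pvNd ((p * 10 + d).toNat) = true := by
          rw [hchild, pvNdChild P d.toNat hP1 (by omega)]
          simp only [hnd, Bool.true_and, decide_eq_true_eq]
          omega
        have hlast' : d = (((p * 10 + d).toNat % 10 : Nat) : Int) := by
          rw [hchild]
          omega
        have hfives' : (pvC5 P : Int) + (if d == 5 then 1 else 0)
            = ((pvC5 ((p * 10 + d).toNat) : Nat) : Int) := by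
          rw [hchild, pvC5Child P d.toNat hP1 (by omega)]
          push_cast
          by_cases hd5 : d = (5 : Int)
          · simp [hd5]
          · have : ¬ d.toNat = 5 := by omega
            simp [beq_iff_eq, hd5, this]
        have := ih (p * 10 + d) d ((pvC5 P : Int) + if d == 5 then 1 else 0)
          (by omega) hnd' hlast' hfives'
        rw [hFdef, hgdef]
        simp only []
        rw [this, show p * 10 + (d + 1) = p * 10 + d + 1 from by ring]
      have hg : ∀ d, ((L : Nat) : Int) ≤ d → d < ((L : Nat) : Int) + ((10 - L : Nat) : Int) →
          g d ≤ g (d + 1) := by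
        intro d _ _
        rw [hgdef]
        simp only []
        have : p * 10 + d ≤ p * 10 + (d + 1) := by omega
        exact mul_le_mul_of_nonneg_right this (by positivity)
      have happly := pvFoldFilter (pvQ fromNum toNum) g F ((10 - L : Nat)) ((L : Nat) : Int) [] hF hg
      rw [hrange, happly, List.nil_append]
      have hga : g ((L : Nat) : Int) = (p * 10 + ((L : Nat) : Int)) * 10 ^ k := rfl
      have hgb : g (((L : Nat) : Int) + ((10 - L : Nat) : Int)) = (p + 1) * 10 ^ (k + 1) := by
        rw [hgdef]
        simp only []
        rw [show ((L : Nat) : Int) + ((10 - L : Nat) : Int) = (10 : Int) from by omega]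
        ring
      rw [hga, hgb]
      -- split the full interval at (p*10+L)*10^k and show the left part contributes nothing
      have hb1 : p * 10 ^ (k + 1) ≤ (p * 10 + ((L : Nat) : Int)) * 10 ^ k := by
        rw [show p * 10 ^ (k + 1) = (p * 10) * 10 ^ k from by ring]
        exact mul_le_mul_of_nonneg_right (by omega) (by positivity)
      have hb2 : (p * 10 + ((L : Nat) : Int)) * 10 ^ k ≤ (p + 1) * 10 ^ (k + 1) := by
        rw [show (p + 1) * 10 ^ (k + 1) = (p * 10 + 10) * 10 ^ k from by ring]
        exact mul_le_mul_of_nonneg_right (by omega) (by positivity)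
      rw [PySem.List.pyRange_one_append (p * 10 ^ (k + 1)) ((p * 10 + ((L : Nat) : Int)) * 10 ^ k)
        ((p + 1) * 10 ^ (k + 1)) hb1 hb2]
      rw [List.filter_append]
      have hnil : (PySem.List.pyRange (p * 10 ^ (k + 1)) ((p * 10 + ((L : Nat) : Int)) * 10 ^ k) 1).filter
          (pvQ fromNum toNum) = [] := by
        rw [List.filter_eq_nil_iff]
        intro n hn
        rw [PySem.List.mem_pyRange_one] at hn
        suffices hsuf : pvNd n.toNat = false by
          simp [pvQ, hsuf]
        by_contra hcon
        rw [Bool.not_eq_false] at hcon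
        have hc1 : ((10 * P * 10 ^ k : Nat) : Int) = p * 10 ^ (k + 1) := by
          push_cast
          rw [hp0]
          ring
        have hc2 : (((10 * P + L) * 10 ^ k : Nat) : Int) = (p * 10 + ((L : Nat) : Int)) * 10 ^ k := by
          push_cast
          rw [hp0]
          ring
        have hn1 : 10 * P * 10 ^ k ≤ n.toNat := by
          have := hn.1
          rw [← hc1] at this
          omega
        have hn2 : n.toNat < (10 * P + L) * 10 ^ k := by
          have := hn.2
          rw [← hc2] at this
          omega
        have hTle : 10 ^ k ≤ n.toNat := by
          calc 10 ^ k = 1 * 10 ^ k := (one_mul _).symm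
            _ ≤ 10 * P * 10 ^ k := Nat.mul_le_mul_right _ (by omega)
            _ ≤ n.toNat := hn1
        have hm : pvNd (n.toNat / 10 ^ k) = true := pvNdDivPow k n.toNat hTle hcon
        have hm1 : 10 * P ≤ n.toNat / 10 ^ k := by
          rw [Nat.le_div_iff_mul_le (by positivity)]
          exact hn1
        have hm2 : n.toNat / 10 ^ k < 10 * P + L := by
          rw [Nat.div_lt_iff_lt_mul (by positivity)]
          exact hn2
        rw [pvNdTen (n.toNat / 10 ^ k) (by omega)] at hm
        simp only [Bool.and_eq_true, decide_eq_true_eq] at hm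
        have hdiv : n.toNat / 10 ^ k / 10 = P := by omega
        rw [hdiv] at hm
        omega
      rw [hnil, List.nil_append]

-- B assembled
theorem pvInner (fromNum toNum : Int) (K : Nat) (acc : List Int) :
    (PySem.List.pyRange 1 10 1).foldl
      (fun acc d => acc ++ searchPwdDfs fromNum toNum d d K (if d == 5 then 1 else 0)) acc
    = acc ++ (PySem.List.pyRange (10 ^ K) (10 ^ (K + 1)) 1).filter (pvQ fromNum toNum) := by
  set g : Int → Int := fun d => d * 10 ^ K with hgdef
  set F : Int → List Int := fun d => searchPwdDfs fromNum toNum d d K (if d == 5 then 1 else 0) with hFdef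
  have hF : ∀ d, (1 : Int) ≤ d → d < (1 : Int) + ((9 : Nat) : Int) →
      F d = (PySem.List.pyRange (g d) (g (d + 1)) 1).filter (pvQ fromNum toNum) := by
    intro d hd1 hd2
    have hdN : (d.toNat : Int) = d := by omega
    have hdlt : d.toNat < 10 := by omega
    have hnd : pvNd d.toNat = true := by rw [pvNd]; simp [hdlt]
    have hlast : d = ((d.toNat % 10 : Nat) : Int) := by omega
    have hfives : (if d == 5 then (1 : Int) else 0) = ((pvC5 d.toNat : Nat) : Int) := by
      rw [show pvC5 d.toNat = if d.toNat = 5 then 1 else 0 from by rw [pvC5]; simp [hdlt]]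
      by_cases hd5 : d = (5 : Int)
      · simp [hd5]
      · have : ¬ d.toNat = 5 := by omega
        simp [beq_iff_eq, hd5, this]
    have := pvDfs fromNum toNum K d d (if d == 5 then 1 else 0) (by omega) hnd hlast hfives
    rw [hFdef, hgdef]
    simp only []
    rw [this]
  have hg : ∀ d, (1 : Int) ≤ d → d < (1 : Int) + ((9 : Nat) : Int) → g d ≤ g (d + 1) := by
    intro d _ _
    exact mul_le_mul_of_nonneg_right (by omega) (by positivity)
  have happly := pvFoldFilter (pvQ fromNum toNum) g F 9 1 acc hF hg
  rw [show PySem.List.pyRange 1 10 1 = PySem.List.pyRange 1 ((1 : Int) + ((9 : Nat) : Int)) 1 from by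
    congr 1]
  rw [happly]
  rw [show g 1 = 10 ^ K from by rw [hgdef]; norm_num,
    show g ((1 : Int) + ((9 : Nat) : Int)) = 10 ^ (K + 1) from by rw [hgdef]; push_cast; ring]

theorem pvAlt (fromNum toNum : Int) :
    searchPwd_alt fromNum toNum
      = (PySem.List.pyRange 1 10000000000 1).filter (pvQ fromNum toNum) := by
  unfold searchPwd_alt
  have hbody : ∀ (acc : List Int), ∀ length ∈ PySem.List.pyRange 1 11 1,
      (PySem.List.pyRange 1 10 1).foldl
        (fun acc d =>
          acc ++ searchPwdDfs fromNum toNum d d (length - 1).toNat (if d == 5 then 1 else 0)) acc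
      = acc ++ (PySem.List.pyRange (10 ^ (length - 1).toNat) (10 ^ ((length - 1).toNat + 1)) 1).filter
          (pvQ fromNum toNum) := by
    intro acc length _
    exact pvInner fromNum toNum (length - 1).toNat acc
  rw [PySem.List.foldl_congr_mem (PySem.List.pyRange 1 11 1) _
    (fun acc length =>
      acc ++ (PySem.List.pyRange (10 ^ (length - 1).toNat) (10 ^ ((length - 1).toNat + 1)) 1).filter
        (pvQ fromNum toNum)) [] (fun acc x hx => hbody acc x hx)]
  set g : Int → Int := fun L => (10 : Int) ^ (L - 1).toNat with hgdef
  set F : Int → List Int := fun L =>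
    (PySem.List.pyRange (10 ^ (L - 1).toNat) (10 ^ ((L - 1).toNat + 1)) 1).filter (pvQ fromNum toNum)
    with hFdef
  have hF : ∀ L, (1 : Int) ≤ L → L < (1 : Int) + ((10 : Nat) : Int) →
      F L = (PySem.List.pyRange (g L) (g (L + 1)) 1).filter (pvQ fromNum toNum) := by
    intro L hL1 hL2
    rw [hFdef, hgdef]
    simp only []
    rw [show (L + 1 - 1).toNat = (L - 1).toNat + 1 from by omega]
  have hg : ∀ L, (1 : Int) ≤ L → L < (1 : Int) + ((10 : Nat) : Int) → g L ≤ g (L + 1) := by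
    intro L hL1 _
    rw [hgdef]
    simp only []
    exact pow_le_pow_right₀ (by norm_num) (by omega)
  have happly := pvFoldFilter (pvQ fromNum toNum) g F 10 1 [] hF hg
  rw [show PySem.List.pyRange 1 11 1 = PySem.List.pyRange 1 ((1 : Int) + ((10 : Nat) : Int)) 1 from by
    congr 1]
  rw [happly, List.nil_append]
  rw [show g 1 = 1 from by rw [hgdef]; norm_num,
    show g ((1 : Int) + ((10 : Nat) : Int)) = 10000000000 from by simp only [hgdef]; rw [show ((1 : Int) + ((10 : Nat) : Int) - 1).toNat = 10 from by omega]; norm_num]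

-- A assembled
theorem pvA (fromNum toNum : Int) :
    searchPwd fromNum toNum
      = (PySem.List.pyRange fromNum toNum 1).filter
          (fun pwd => searchPwdScan '0' (PySem.Int.toStr pwd).toList
            && decide (2 ≤ PySem.Str.count (PySem.Int.toStr pwd) "5")) := by
  unfold searchPwd
  have := PySem.List.foldl_append_if
    (fun pwd => searchPwdScan '0' (PySem.Int.toStr pwd).toList
      && decide (2 ≤ PySem.Str.count (PySem.Int.toStr pwd) "5"))
    (id : Int → Int) (PySem.List.pyRange fromNum toNum 1) []
  simpa using this

theorem searchPwd_final (fromNum toNum : Int)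
    (hdom : -2147483648 ≤ toNum ∧ toNum ≤ 2147483648) :
    searchPwd fromNum toNum = searchPwd_alt fromNum toNum := by
  rw [pvA, pvAlt]
  have hmem : ∀ x : Int,
      x ∈ (PySem.List.pyRange fromNum toNum 1).filter
          (fun pwd => searchPwdScan '0' (PySem.Int.toStr pwd).toList
            && decide (2 ≤ PySem.Str.count (PySem.Int.toStr pwd) "5"))
      ↔ x ∈ (PySem.List.pyRange 1 10000000000 1).filter (pvQ fromNum toNum) := by
    intro x
    simp only [List.mem_filter, PySem.List.mem_pyRange_one]
    rw [pvP_iff x]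
    constructor
    · rintro ⟨⟨h1, h2⟩, h3, h4, h5⟩
      refine ⟨⟨by omega, by omega⟩, ?_⟩
      simp [pvQ, h1, h2, h4, h5]
    · rintro ⟨⟨h1, h2⟩, hq⟩
      simp only [pvQ, Bool.and_eq_true, decide_eq_true_eq] at hq
      exact ⟨⟨hq.1.1.1, hq.1.1.2⟩, by omega, hq.1.2, hq.2⟩
  have hnd1 : ((PySem.List.pyRange fromNum toNum 1).filter
      (fun pwd => searchPwdScan '0' (PySem.Int.toStr pwd).toList
        && decide (2 ≤ PySem.Str.count (PySem.Int.toStr pwd) "5"))).Nodup :=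
    (PySem.List.nodup_pyRange_one fromNum toNum).filter _
  have hnd2 : ((PySem.List.pyRange 1 10000000000 1).filter (pvQ fromNum toNum)).Nodup :=
    (PySem.List.nodup_pyRange_one 1 10000000000).filter _
  have hperm := (List.perm_ext_iff_of_nodup hnd1 hnd2).mpr hmem
  have hs1 : List.Pairwise (· < ·) ((PySem.List.pyRange fromNum toNum 1).filter
      (fun pwd => searchPwdScan '0' (PySem.Int.toStr pwd).toList
        && decide (2 ≤ PySem.Str.count (PySem.Int.toStr pwd) "5"))) :=
    (PySem.List.pairwise_lt_pyRange_one fromNum toNum).sublist List.filter_sublist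
  have hs2 : List.Pairwise (· < ·) ((PySem.List.pyRange 1 10000000000 1).filter (pvQ fromNum toNum)) :=
    (PySem.List.pairwise_lt_pyRange_one 1 10000000000).sublist List.filter_sublist
  exact List.eq_of_perm_of_sorted (fun a b _ _ hab hba => by omega) hs1 hs2 hperm

-- ===== VERDICT (by name: the statement is the Claim_ definition above) =====
theorem searchPwd_spec : Claim_equal_searchPwd := by
  intro fromNum toNum hdom
  show searchPwd fromNum toNum = searchPwd_alt fromNum toNum
  unfold Dom_searchPwd pvDomInt at hdom
  simp only [Bool.and_eq_true, decide_eq_true_eq] at hdom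
  exact searchPwd_final fromNum toNum hdom.2
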